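-- pv_equiv track=rewrite | github.com/jsh/bibseq | bibseq_1.py | bibseq
-- ===== SOURCE A (Python) =====
-- def bibseq(sequence):
--     subsequences = []
--     current_subsequence = []
--     leading_element = float(
--         "inf"
--     )  # Initialize to positive infinity to handle the first subsequence
--
--     for element in sequence:
--         if element < leading_element:
--             if current_subsequence:
--                 subsequences.append(current_subsequence)
--             current_subsequence = [element]
--             leading_element = element
--         else:
--             current_subsequence.append(element)
--
--     # Add the last subsequence after the loop finishes
--     if current_subsequence:
--         subsequences.append(current_subsequence)
--
--     return subsequences
-- ===== SOURCE B (Python) =====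
-- def bibseq(sequence):
--     seq = list(sequence)
--     n = len(seq)
--     out = []
--     i = 0
--     while i < n:
--         j = i + 1
--         while j < n and seq[j] >= seq[i]:
--             j += 1
--         out.append(seq[i:j])
--         i = j
--     return out
-- ===== Notes on version B (the rewrite author's own statement) =====
-- stated objective: alternative
-- what changed: Replaces A's single pass with a running-min variable and a buffer that is flushed at each new minimum by a two-pointer scan: an inner pointer advances past the elements >= the segment head and each segment is emitted as one slice, with no running-min or buffer state.
import Mathlib
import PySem

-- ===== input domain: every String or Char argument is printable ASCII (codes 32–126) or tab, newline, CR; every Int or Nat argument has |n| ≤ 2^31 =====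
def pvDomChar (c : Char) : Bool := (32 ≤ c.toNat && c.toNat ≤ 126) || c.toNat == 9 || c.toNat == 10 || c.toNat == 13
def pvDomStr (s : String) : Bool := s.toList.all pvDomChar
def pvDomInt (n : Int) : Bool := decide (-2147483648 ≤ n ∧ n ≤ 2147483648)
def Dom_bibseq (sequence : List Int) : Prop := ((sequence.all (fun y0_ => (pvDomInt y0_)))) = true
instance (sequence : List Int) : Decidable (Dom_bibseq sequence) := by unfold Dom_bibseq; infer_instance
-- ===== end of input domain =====

-- B replaces A's running-min/buffer accumulate-and-flush pass by a two-pointer scan that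
-- emits each run as one slice; return values are proved equal on all inputs.

-- ===== PORT A =====
-- loop body of A: state = (subsequences, current_subsequence, leading_element); none = +inf
def bibseqStep (st : List (List Int) × List Int × Option Int) (element : Int) :
    List (List Int) × List Int × Option Int :=
  match st with
  | (subs, cur, lead) =>
    if (match lead with | none => true | some m => decide (element < m)) = true then
      ((if cur ≠ [] then subs ++ [cur] else subs), [element], some element)
    else
      (subs, cur ++ [element], lead)

def bibseq (sequence : List Int) : List (List Int) :=
  let st := sequence.foldl bibseqStep ([], [], none)
  if st.2.1 ≠ [] then st.1 ++ [st.2.1] else st.1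

-- ===== PORT B =====
-- inner while loop of Source B: advance j past elements >= seq[i] (x = seq[i])
def bibseqScan (seq : List Int) (n : Nat) (x : Int) (j : Nat) : Nat :=
  if h : j < n ∧ x ≤ seq.getD j 0 then bibseqScan seq n x (j + 1) else j
termination_by n - j
decreasing_by omega

-- needed by the outer loop's termination
theorem bibseqScan_ge (seq : List Int) (n : Nat) (x : Int) (j : Nat) :
    j ≤ bibseqScan seq n x j := by
  induction j using bibseqScan.induct seq n x with
  | case1 j h ih => rw [bibseqScan, dif_pos h]; omega
  | case2 j h => rw [bibseqScan, dif_neg h]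

-- outer while loop of Source B, carrying the accumulator `out`
def bibseqOuter (seq : List Int) (n : Nat) (out : List (List Int)) (i : Nat) :
    List (List Int) :=
  if _ : i < n then
    let j := bibseqScan seq n (seq.getD i 0) (i + 1)
    bibseqOuter seq n (out ++ [PySem.List.slice seq (some (i : Int)) (some (j : Int))]) j
  else out
termination_by n - i
decreasing_by have := bibseqScan_ge seq n (seq.getD i 0) (i + 1); omega

def bibseq_alt (sequence : List Int) : List (List Int) :=
  bibseqOuter sequence sequence.length [] 0

-- ===== PRECONDITION & SPEC =====
def Spec_bibseq (sequence : List Int) (out : List (List Int)) : Prop := out = bibseq_alt sequence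
instance (sequence : List Int) (out : List (List Int)) : Decidable (Spec_bibseq sequence out) := by unfold Spec_bibseq; infer_instance

-- ===== CLAIM (what is proved, stated in full; the proofs are below) =====
def Claim_equal_bibseq : Prop := ∀ (sequence : List Int), Dom_bibseq sequence → Spec_bibseq sequence (bibseq sequence)

-- ===== LEMMAS AND PROOFS =====

-- common reference: split at strict running minima, span-style
def runs : List Int → List (List Int)
  | [] => []
  | x :: xs =>
      (x :: xs.takeWhile (fun y => x ≤ y)) :: runs (xs.dropWhile (fun y => x ≤ y))
termination_by l => l.length
decreasing_by
  simpa using Nat.lt_succ_of_le (xs.length_dropWhile_le _)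

theorem bibseq_loop_eq (l : List Int) :
    ∀ (subs : List (List Int)) (cur : List Int) (m : Int), cur ≠ [] →
      (let st := l.foldl bibseqStep (subs, cur, some m);
        if st.2.1 ≠ [] then st.1 ++ [st.2.1] else st.1)
      = subs ++ (cur ++ l.takeWhile (fun y => m ≤ y)) ::
          runs (l.dropWhile (fun y => m ≤ y)) := by
  induction l with
  | nil => intro subs cur m hc; simp [runs, hc]
  | cons x l ih =>
    intro subs cur m hc
    by_cases hx : x < m
    · have hnot : ¬ (m ≤ x) := by omega
      have hstep : bibseqStep (subs, cur, some m) x = (subs ++ [cur], [x], some x) := by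
        simp [bibseqStep, hx, hc]
      rw [List.foldl_cons, hstep]
      have := ih (subs ++ [cur]) [x] x (by simp)
      simp only at this
      rw [this]
      simp only [List.takeWhile_cons, List.dropWhile_cons, hnot, decide_false,
        Bool.false_eq_true, if_false]
      rw [runs]
      simp
    · have hm : m ≤ x := by omega
      have hstep : bibseqStep (subs, cur, some m) x = (subs, cur ++ [x], some m) := by
        simp [bibseqStep, hx]
      rw [List.foldl_cons, hstep]
      have := ih subs (cur ++ [x]) m (by simp)
      simp only at this
      rw [this]
      simp only [List.takeWhile_cons, List.dropWhile_cons, hm, decide_true, if_true]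
      simp

theorem bibseq_eq_runs (sequence : List Int) : bibseq sequence = runs sequence := by
  cases sequence with
  | nil => simp [bibseq, runs]
  | cons x xs =>
    unfold bibseq
    have hstep : bibseqStep ([], [], none) x = ([], [x], some x) := by
      simp [bibseqStep]
    rw [List.foldl_cons, hstep]
    rw [bibseq_loop_eq xs [] [x] x (by simp)]
    rw [runs]
    simp

theorem bibseqScan_eq (seq : List Int) (x : Int) (j : Nat) :
    bibseqScan seq seq.length x j
      = j + ((seq.drop j).takeWhile (fun y => x ≤ y)).length := by
  induction j using bibseqScan.induct seq seq.length x with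
  | case1 j h ih =>
    obtain ⟨hj, hx⟩ := h
    rw [bibseqScan, dif_pos ⟨hj, hx⟩]
    rw [ih, List.drop_eq_getElem_cons hj, List.takeWhile_cons]
    have hg : seq.getD j 0 = seq[j] := List.getD_eq_getElem seq 0 hj
    rw [hg] at hx
    simp only [hx, decide_true, if_true, List.length_cons]
    omega
  | case2 j h =>
    rw [bibseqScan, dif_neg h]
    by_cases hj : j < seq.length
    · have hx : ¬ x ≤ seq.getD j 0 := fun hx => h ⟨hj, hx⟩
      have hg : seq.getD j 0 = seq[j] := List.getD_eq_getElem seq 0 hj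
      rw [List.drop_eq_getElem_cons hj, List.takeWhile_cons]
      rw [hg] at hx
      simp [hx]
    · have : seq.drop j = [] := List.drop_eq_nil_of_le (by omega)
      simp [this]

theorem takeWhile_eq_take (p : Int → Bool) (l : List Int) :
    l.take (l.takeWhile p).length = l.takeWhile p := by
  induction l with
  | nil => simp
  | cons a l ih =>
    by_cases h : p a
    · simp [h, ih]
    · simp [h]

theorem drop_takeWhile_length (p : Int → Bool) (l : List Int) :
    l.drop (l.takeWhile p).length = l.dropWhile p := by
  induction l with
  | nil => simp
  | cons a l ih =>
    by_cases h : p a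
    · simp [h, ih]
    · simp [h]

theorem bibseqOuter_eq (seq : List Int) (out : List (List Int)) (j : Nat) :
    bibseqOuter seq seq.length out j = out ++ runs (seq.drop j) := by
  induction out, j using bibseqOuter.induct seq seq.length with
  | case1 out j hj k ih =>
    have hk : k = bibseqScan seq seq.length (seq.getD j 0) (j + 1) := rfl
    rw [hk] at ih
    rw [bibseqOuter, dif_pos hj]
    set x := seq.getD j 0 with hxdef
    have hg : x = seq[j] := List.getD_eq_getElem seq 0 hj
    set t := ((seq.drop (j + 1)).takeWhile (fun y => x ≤ y)) with htdef
    have hk : bibseqScan seq seq.length x (j + 1) = (j + 1) + t.length :=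
      bibseqScan_eq seq x (j + 1)
    have hslice : PySem.List.slice seq (some (j : Int))
        (some ((bibseqScan seq seq.length x (j + 1) : Nat) : Int)) = x :: t := by
      rw [PySem.List.slice_natCast, hk]
      have h1 : (j + 1) + t.length - j = t.length + 1 := by omega
      rw [h1, List.drop_eq_getElem_cons hj, List.take_succ_cons, ← hg,
        htdef, takeWhile_eq_take]
    have hdrop : seq.drop (bibseqScan seq seq.length x (j + 1))
        = (seq.drop (j + 1)).dropWhile (fun y => x ≤ y) := by
      rw [hk, ← drop_takeWhile_length (fun y => x ≤ y) (seq.drop (j + 1)),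
        ← htdef, List.drop_drop]
    have hexp : runs (seq.drop j)
        = (x :: t) :: runs ((seq.drop (j + 1)).dropWhile (fun y => x ≤ y)) := by
      rw [List.drop_eq_getElem_cons hj, ← hg, runs]
    rw [ih, hslice, hexp, hdrop]
    simp
  | case2 out j hj =>
    rw [bibseqOuter, dif_neg hj]
    have : seq.drop j = [] := List.drop_eq_nil_of_le (by omega)
    simp [this, runs]

theorem bibseq_alt_eq_runs (sequence : List Int) : bibseq_alt sequence = runs sequence := by
  unfold bibseq_alt
  rw [bibseqOuter_eq]
  simp

-- ===== VERDICT (by name: the statement is the Claim_ definition above) =====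
theorem bibseq_spec : Claim_equal_bibseq := by
  intro sequence _
  unfold Spec_bibseq
  rw [bibseq_eq_runs, bibseq_alt_eq_runs]
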